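-- pv_equiv track=rewrite | github.com/cbizon/metapath-counts | scripts/group_single_onehop_worker.py | should_exclude_metapath
-- ===== SOURCE A (Python) =====
-- def should_exclude_metapath(metapath, excluded_types, excluded_predicates):
--     """Check if a metapath should be excluded based on types or predicates."""
--     if not excluded_types and not excluded_predicates:
--         return False
--
--     parts = metapath.split('|')
--     # Extract nodes and predicates from metapath
--     # Format: Node|pred|dir|Node|pred|dir|...
--     nodes = []
--     predicates = []
--     for i, part in enumerate(parts):
--         if i % 3 == 0:  # Node positions: 0, 3, 6, ...
--             nodes.append(part)
--         elif i % 3 == 1:  # Predicate positions: 1, 4, 7, ...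
--             predicates.append(part)
--
--     if excluded_types:
--         for node in nodes:
--             if node in excluded_types:
--                 return True
--
--     if excluded_predicates:
--         for pred in predicates:
--             if pred in excluded_predicates:
--                 return True
--
--     return False
-- ===== SOURCE B (Python) =====
-- def should_exclude_metapath(metapath, excluded_types, excluded_predicates):
--     """Check if a metapath should be excluded based on types or predicates."""
--     for i, part in enumerate(metapath.split('|')):
--         if i % 3 == 0 and part in excluded_types:
--             return True
--         if i % 3 == 1 and part in excluded_predicates:
--             return True
--     return False
-- ===== Notes on version B (the rewrite author's own statement) =====
-- stated objective: simpler
-- what changed: Single pass over enumerate(split parts) deciding by index modulo 3, instead of building nodes/predicates lists and then scanning each; the combined-empty guard and the truthiness checks become unnecessary and are dropped.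
import Mathlib
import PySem

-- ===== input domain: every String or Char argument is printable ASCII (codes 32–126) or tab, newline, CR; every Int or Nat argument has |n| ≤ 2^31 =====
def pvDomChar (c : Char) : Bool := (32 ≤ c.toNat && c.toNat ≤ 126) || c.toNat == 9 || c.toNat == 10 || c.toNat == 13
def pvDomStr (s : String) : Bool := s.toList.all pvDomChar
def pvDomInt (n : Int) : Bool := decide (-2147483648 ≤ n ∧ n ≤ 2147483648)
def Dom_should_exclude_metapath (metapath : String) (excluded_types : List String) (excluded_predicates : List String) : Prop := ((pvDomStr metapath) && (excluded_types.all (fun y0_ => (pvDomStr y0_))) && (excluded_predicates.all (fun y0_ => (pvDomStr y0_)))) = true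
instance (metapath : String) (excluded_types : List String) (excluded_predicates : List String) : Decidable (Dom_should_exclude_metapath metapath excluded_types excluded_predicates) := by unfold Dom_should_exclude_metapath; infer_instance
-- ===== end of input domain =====

-- B replaces A's build-nodes/predicates-lists-then-scan-each with a single pass over the
-- enumerated parts deciding by index mod 3; same return value, no side effects.

-- ===== PORT A =====
-- loop body of A's first for-loop (builds the nodes/predicates lists)
def pvStepA (acc : List String × List String) (ip : Int × String) : List String × List String :=
  if PySem.Int.mod ip.1 3 = 0 then (acc.1 ++ [ip.2], acc.2)
  else if PySem.Int.mod ip.1 3 = 1 then (acc.1, acc.2 ++ [ip.2])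
  else acc

def should_exclude_metapath (metapath : String) (excluded_types : List String) (excluded_predicates : List String) : Bool :=
  if excluded_types.isEmpty && excluded_predicates.isEmpty then false
  else
    let parts := (PySem.Str.split? metapath "|").getD []
    let np := (PySem.List.enumerate parts 0).foldl pvStepA ([], [])
    -- 'for node in nodes: if node in excluded_types: return True'
    if !excluded_types.isEmpty && np.1.any (fun n => excluded_types.contains n) then true
    else if !excluded_predicates.isEmpty && np.2.any (fun p => excluded_predicates.contains p) then true
    else false

-- ===== PORT B =====
-- B's loop body: does this indexed part hit an exclusion list?
def pvPredB (ts ps : List String) (ip : Int × String) : Bool :=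
  (PySem.Int.mod ip.1 3 == 0 && ts.contains ip.2) ||
  (PySem.Int.mod ip.1 3 == 1 && ps.contains ip.2)

def should_exclude_metapath_alt (metapath : String) (excluded_types : List String) (excluded_predicates : List String) : Bool :=
  (PySem.List.enumerate ((PySem.Str.split? metapath "|").getD []) 0).any
    (pvPredB excluded_types excluded_predicates)

-- ===== PRECONDITION & SPEC =====
def Spec_should_exclude_metapath (metapath : String) (excluded_types : List String) (excluded_predicates : List String) (out : Bool) : Prop := out = should_exclude_metapath_alt metapath excluded_types excluded_predicates
instance (metapath : String) (excluded_types : List String) (excluded_predicates : List String) (out : Bool) : Decidable (Spec_should_exclude_metapath metapath excluded_types excluded_predicates out) := by unfold Spec_should_exclude_metapath; infer_instance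

-- ===== CLAIM (what is proved, stated in full; the proofs are below) =====
def Claim_equal_should_exclude_metapath : Prop := ∀ (metapath : String) (excluded_types : List String) (excluded_predicates : List String), Dom_should_exclude_metapath metapath excluded_types excluded_predicates → Spec_should_exclude_metapath metapath excluded_types excluded_predicates (should_exclude_metapath metapath excluded_types excluded_predicates)

-- ===== LEMMAS AND PROOFS =====

-- A's build-then-scan over any enumerated tail equals B's fused single pass
lemma fold_any (ts ps : List String) (l : List String) : ∀ (s : Int) (a b : List String),
    ((((PySem.List.enumerate l s).foldl pvStepA (a, b)).1.any (fun n => ts.contains n)) ||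
     (((PySem.List.enumerate l s).foldl pvStepA (a, b)).2.any (fun p => ps.contains p)))
    = (a.any (fun n => ts.contains n) || b.any (fun p => ps.contains p) ||
       (PySem.List.enumerate l s).any (pvPredB ts ps)) := by
  induction l with
  | nil => intro s a b; simp [PySem.List.enumerate_nil]
  | cons x xs ih =>
    intro s a b
    rw [PySem.List.enumerate_cons]
    simp only [List.foldl_cons, List.any_cons]
    by_cases h0 : PySem.Int.mod s 3 = 0
    · simp only [pvStepA, pvPredB, h0, ih]
      simp [List.any_append, Bool.or_assoc, Bool.or_comm, Bool.or_left_comm]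
    · by_cases h1 : PySem.Int.mod s 3 = 1
      · simp only [pvStepA, pvPredB, h1, ih]
        simp [List.any_append, Bool.or_assoc, Bool.or_comm, Bool.or_left_comm]
      · have h0' : ¬ s % 3 = 0 := by rwa [← PySem.Int.mod_eq_emod_of_pos (by norm_num : (0:Int) < 3)]
        have h1' : ¬ s % 3 = 1 := by rwa [← PySem.Int.mod_eq_emod_of_pos (by norm_num : (0:Int) < 3)]
        have hb0 : (s % 3 == 0) = false := beq_eq_false_iff_ne.mpr h0'
        have hb1 : (s % 3 == 1) = false := beq_eq_false_iff_ne.mpr h1'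
        have hd : ¬ ((3:Int) ∣ s) := by omega
        simp only [pvStepA, pvPredB, h1, ih]
        simp [hd, hb0, hb1]

-- A's empty-guard / truthiness-guarded scan result, as a boolean identity
lemma guard_eq (e1 e2 X Y : Bool) (hX : e1 = true → X = false) (hY : e2 = true → Y = false) :
    (if e1 && e2 then false else if !e1 && X then true else if !e2 && Y then true else false)
    = (X || Y) := by
  cases e1 <;> cases e2 <;> cases X <;> cases Y <;> simp_all

theorem should_exclude_metapath_spec : Claim_equal_should_exclude_metapath := by
  intro mp ts ps _
  unfold Spec_should_exclude_metapath should_exclude_metapath should_exclude_metapath_alt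
  have h := fold_any ts ps ((PySem.Str.split? mp "|").getD []) 0 [] []
  simp only [List.any_nil, Bool.false_or] at h
  rw [← h]
  exact guard_eq _ _ _ _
    (fun he => by simp [List.isEmpty_iff.mp he])
    (fun he => by simp [List.isEmpty_iff.mp he])
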